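-- pv_equiv track=rewrite | github.com/HELLOI9/NJU_Notes | update.py | find_nav_block
-- ===== SOURCE A (Python) =====
-- def find_nav_block(content):
--     """Return the start/end offsets for the top-level nav block in mkdocs.yml."""
--     lines = content.splitlines(keepends=True)
--     start_line = None
--
--     for i, line in enumerate(lines):
--         if line.startswith("nav:"):
--             start_line = i
--             break
--
--     if start_line is None:
--         return None, None
--
--     end_line = len(lines)
--     for i in range(start_line + 1, len(lines)):
--         line = lines[i]
--         stripped = line.strip()
--
--         if not stripped:
--             continue
--
--         # The nav block can contain top-level list items like "- Home: index.md".
--         # Stop only when the next top-level mapping key begins.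
--         if not line.startswith((" ", "\t", "-")):
--             end_line = i
--             break
--
--     start = sum(len(line) for line in lines[:start_line])
--     end = sum(len(line) for line in lines[:end_line])
--     return start, end
-- ===== SOURCE B (Python) =====
-- def find_nav_block(content):
--     """Return the start/end offsets for the top-level nav block in mkdocs.yml."""
--     offset = 0
--     start = None
--     for line in content.splitlines(keepends=True):
--         if start is None:
--             if line.startswith("nav:"):
--                 start = offset
--         elif line.strip() and not line.startswith((" ", "\t", "-")):
--             return start, offset
--         offset += len(line)
--     if start is None:
--         return None, None
--     return start, offset
-- ===== Notes on version B (the rewrite author's own statement) =====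
-- stated objective: simpler
-- what changed: Replaced the index-finding loop, the separate range-scan for the end line and the two sum() prefix passes over line slices by a single pass over the keepends lines that maintains one running offset and snapshots it at the nav line and at the terminating top-level key.
import Mathlib
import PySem

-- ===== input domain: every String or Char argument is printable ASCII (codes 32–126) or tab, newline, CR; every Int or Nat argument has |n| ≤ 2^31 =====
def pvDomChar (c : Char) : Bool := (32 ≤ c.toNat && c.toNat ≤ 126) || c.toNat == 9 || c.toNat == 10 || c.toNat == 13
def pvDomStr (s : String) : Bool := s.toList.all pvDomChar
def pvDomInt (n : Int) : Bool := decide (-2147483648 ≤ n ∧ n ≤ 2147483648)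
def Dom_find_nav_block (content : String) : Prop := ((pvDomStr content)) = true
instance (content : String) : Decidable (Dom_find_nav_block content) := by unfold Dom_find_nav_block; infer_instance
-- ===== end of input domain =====

-- B replaces A's index-finding loop, range-scan and two sum() prefix passes by one pass over the
-- keepends lines with a running offset (objective: simpler, one traversal instead of several).

-- content.splitlines(keepends=True): exact on Dom, where the only line-break characters are
-- '\n', '\r' and '\r\n' (Python's extra break characters \v, \f, \x1c-\x1e, \x85, \u2028/29
-- cannot occur in a Dom string).  Shared by both ports, as both Pythons call the same builtin.
def pvSplitKeep (acc : List Char) : List Char → List (List Char)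
  | [] => if acc.isEmpty then [] else [acc.reverse]
  | '\r' :: '\n' :: rest => (acc.reverse ++ ['\r', '\n']) :: pvSplitKeep [] rest
  | '\n' :: rest => (acc.reverse ++ ['\n']) :: pvSplitKeep [] rest
  | '\r' :: rest => (acc.reverse ++ ['\r']) :: pvSplitKeep [] rest
  | c :: rest => pvSplitKeep (c :: acc) rest

-- "nav:" as a char list
def pvNav : List Char := ['n', 'a', 'v', ':']

-- ===== PORT A =====
-- first loop: `for i, line in enumerate(lines): if line.startswith("nav:"): start_line = i; break`
def pvAFindStart (k : Int) : List (List Char) → Option Int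
  | [] => none
  | l :: rest =>
      if PySem.Chars.startswith l pvNav then some k else pvAFindStart (k + 1) rest

-- second loop: `for i in range(start_line + 1, len(lines)): …` with break; e is end_line's
-- current value (len(lines)).  lines[i] is ported as pyGetD (every index produced by the
-- range is in bounds, so the default is never read).
def pvAFindEnd (lines : List (List Char)) : List Int → Int → Int
  | [], e => e
  | i :: rest, e =>
      let line := PySem.List.pyGetD lines i []
      let stripped := PySem.Chars.strip line
      if stripped = [] then pvAFindEnd lines rest e
      else if !(PySem.Chars.startswith line [' '] || PySem.Chars.startswith line ['\t']
                || PySem.Chars.startswith line ['-']) then i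
      else pvAFindEnd lines rest e

-- sum(len(line) for line in <ls>)
def pvSumLen (ls : List (List Char)) : Int := (ls.map (fun l => (l.length : Int))).sum

def pvABody (lines : List (List Char)) : Option Int × Option Int :=
  match pvAFindStart 0 lines with
  | none => (none, none)
  | some start_line =>
      let end_line := pvAFindEnd lines
        (PySem.List.pyRange (start_line + 1) (lines.length : Int)) (lines.length : Int)
      let start := pvSumLen (PySem.List.slice lines none (some start_line))
      let e := pvSumLen (PySem.List.slice lines none (some end_line))
      (some start, some e)

def find_nav_block (content : String) : Option Int × Option Int :=
  pvABody (pvSplitKeep [] content.toList)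

-- ===== PORT B =====
-- `line.strip() and not line.startswith((" ", "\t", "-"))`
def pvIsTerm (l : List Char) : Bool :=
  !(PySem.Chars.strip l).isEmpty
    && !(PySem.Chars.startswith l [' '] || PySem.Chars.startswith l ['\t']
         || PySem.Chars.startswith l ['-'])

-- B's single loop: state = (running offset, recorded start or None); early return on terminator.
def pvBLoop : List (List Char) → Int → Option Int → Option Int × Option Int
  | [], _, none => (none, none)
  | [], off, some s => (some s, some off)
  | l :: rest, off, none =>
      if PySem.Chars.startswith l pvNav then pvBLoop rest (off + l.length) (some off)
      else pvBLoop rest (off + l.length) none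
  | l :: rest, off, some s =>
      if pvIsTerm l then (some s, some off) else pvBLoop rest (off + l.length) (some s)

def find_nav_block_alt (content : String) : Option Int × Option Int :=
  pvBLoop (pvSplitKeep [] content.toList) 0 none

-- ===== PRECONDITION & SPEC =====
def Spec_find_nav_block (content : String) (out : Option Int × Option Int) : Prop := out = find_nav_block_alt content
instance (content : String) (out : Option Int × Option Int) : Decidable (Spec_find_nav_block content out) := by unfold Spec_find_nav_block; infer_instance

-- ===== CLAIM (what is proved, stated in full; the proofs are below) =====
def Claim_equal_find_nav_block : Prop := ∀ (content : String), Dom_find_nav_block content → Spec_find_nav_block content (find_nav_block content)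

-- ===== LEMMAS AND PROOFS =====

-- total length, from the nav-line's successor up to (excluding) the first terminating line
def pvT : List (List Char) → Int
  | [] => 0
  | l :: r => if pvIsTerm l then 0 else (l.length : Int) + pvT r

-- once `start` is set, B returns (start, offset-at-first-terminator), default offset = total
theorem pvBLoop_some (R : List (List Char)) : ∀ (off s : Int),
    pvBLoop R off (some s) = (some s, some (off + pvT R)) := by
  induction R with
  | nil => intro off s; simp [pvBLoop, pvT]
  | cons l rest ih =>
      intro off s
      by_cases h : pvIsTerm l = true
      · simp [pvBLoop, pvT, h]
      · simp only [Bool.not_eq_true] at h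
        simp [pvBLoop, pvT, h, ih]
        ring

-- the common structural shape both ports reduce to
def pvAres : List (List Char) → Int → Option Int × Option Int
  | [], _ => (none, none)
  | l :: rest, off =>
      if PySem.Chars.startswith l pvNav then (some off, some (off + l.length + pvT rest))
      else pvAres rest (off + l.length)

theorem pvBLoop_none (L : List (List Char)) : ∀ (off : Int),
    pvBLoop L off none = pvAres L off := by
  induction L with
  | nil => intro off; simp [pvBLoop, pvAres]
  | cons l rest ih =>
      intro off
      by_cases h : PySem.Chars.startswith l pvNav = true
      · show pvBLoop (l :: rest) off none = pvAres (l :: rest) off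
        unfold pvBLoop pvAres
        simp only [h, if_true]
        rw [pvBLoop_some]
      · simp only [Bool.not_eq_true] at h
        show pvBLoop (l :: rest) off none = pvAres (l :: rest) off
        unfold pvBLoop pvAres
        simp only [h, Bool.false_eq_true, if_false]
        exact ih (off + l.length)

theorem pvAFindStart_spec (L : List (List Char)) : ∀ (k : Int),
    pvAFindStart k L
      = (L.findIdx? (fun l => PySem.Chars.startswith l pvNav)).map (fun i => k + (i : Int)) := by
  induction L with
  | nil => intro k; simp [pvAFindStart]
  | cons l rest ih =>
      intro k
      by_cases h : PySem.Chars.startswith l pvNav = true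
      · simp [pvAFindStart, h, List.findIdx?_cons]
      · simp only [Bool.not_eq_true] at h
        simp [pvAFindStart, h, List.findIdx?_cons, ih]
        cases rest.findIdx? (fun l => PySem.Chars.startswith l pvNav) with
        | none => simp
        | some i => simp; ring

theorem pvSumLen_take_succ (L : List (List Char)) (j : Nat) (h : j < L.length) :
    pvSumLen (L.take (j + 1)) = pvSumLen (L.take j) + (L[j].length : Int) := by
  unfold pvSumLen
  have h' : j < (L.map (fun l => (l.length : Int))).length := by simpa using h
  rw [List.map_take, List.map_take, List.sum_take_succ _ j h']
  simp

theorem pvAFindEnd_spec (L : List (List Char)) : ∀ (j : Nat), j ≤ L.length →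
    ∃ m : Nat, m ≤ L.length ∧
      pvAFindEnd L (PySem.List.pyRange (j : Int) (L.length : Int)) (L.length : Int) = (m : Int) ∧
      pvSumLen (L.take m) = pvSumLen (L.take j) + pvT (L.drop j) := by
  intro j hj
  induction hn : L.length - j generalizing j with
  | zero =>
      have hjl : j = L.length := by omega
      subst hjl
      refine ⟨L.length, le_refl _, ?_, ?_⟩
      · simp [PySem.List.pyRange, pvAFindEnd]
      · simp [pvT]
  | succ n ih =>
      have hlt : j < L.length := by omega
      have hcast : (j : Int) < (L.length : Int) := by exact_mod_cast hlt
      rw [PySem.List.pyRange_one_cons hcast]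
      have hdrop : L[j] :: L.drop (j + 1) = L.drop j := List.getElem_cons_drop hlt
      have hget : PySem.List.pyGetD L (j : Int) [] = L[j] := by
        rw [PySem.List.pyGetD_natCast]
        simp [List.getD, List.getElem?_eq_getElem hlt]
      by_cases hterm : pvIsTerm L[j] = true
      · -- terminator: end_line = j
        have hs : ¬ (PySem.Chars.strip L[j] = []) := by
          unfold pvIsTerm at hterm
          simp only [Bool.and_eq_true, Bool.not_eq_true'] at hterm
          simpa [List.isEmpty_iff] using hterm.1
        have hw : (PySem.Chars.startswith L[j] [' '] || PySem.Chars.startswith L[j] ['\t']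
              || PySem.Chars.startswith L[j] ['-']) = false := by
          unfold pvIsTerm at hterm
          simp only [Bool.and_eq_true, Bool.not_eq_true'] at hterm
          exact hterm.2
        refine ⟨j, le_of_lt hlt, ?_, ?_⟩
        · simp [pvAFindEnd, hget, hs, hw]
        · rw [← hdrop]; simp [pvT, hterm]
      · -- blank line or indented/list line: continue
        have hcont : pvAFindEnd L ((j : Int) :: PySem.List.pyRange ((j : Int) + 1) (L.length : Int))
              (L.length : Int)
            = pvAFindEnd L (PySem.List.pyRange ((j : Int) + 1) (L.length : Int)) (L.length : Int) := by
          unfold pvIsTerm at hterm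
          simp only [Bool.and_eq_true, Bool.not_eq_true', not_and_or] at hterm
          rcases hterm with hblank | hw
          · have : PySem.Chars.strip L[j] = [] := by simpa [List.isEmpty_iff] using hblank
            simp [pvAFindEnd, hget, this]
          · simp [pvAFindEnd, hget, hw]
        rw [hcont]
        have hcast1 : ((j : Int) + 1) = ((j + 1 : Nat) : Int) := by push_cast; ring
        rw [hcast1]
        obtain ⟨m, hm, heq, hsum⟩ := ih (j + 1) (by omega) (by omega)
        refine ⟨m, hm, heq, ?_⟩
        rw [hsum, pvSumLen_take_succ L j hlt, ← hdrop]
        simp only [pvT, hterm, Bool.false_eq_true, if_false]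
        ring

theorem pvAres_spec (L : List (List Char)) : ∀ (off : Int),
    pvAres L off
      = match L.findIdx? (fun l => PySem.Chars.startswith l pvNav) with
        | none => (none, none)
        | some i => (some (off + pvSumLen (L.take i)),
                     some (off + pvSumLen (L.take (i + 1)) + pvT (L.drop (i + 1)))) := by
  induction L with
  | nil => intro off; simp [pvAres]
  | cons l rest ih =>
      intro off
      by_cases h : PySem.Chars.startswith l pvNav = true
      · simp [pvAres, h, List.findIdx?_cons, pvSumLen]
      · simp only [Bool.not_eq_true] at h
        simp only [pvAres, h, List.findIdx?_cons, Bool.false_eq_true, if_false, ih]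
        cases rest.findIdx? (fun l => PySem.Chars.startswith l pvNav) with
        | none => simp
        | some i =>
            simp [pvSumLen]
            constructor <;> ring

theorem pvABody_eq (L : List (List Char)) : pvABody L = pvAres L 0 := by
  rw [pvAres_spec]
  unfold pvABody
  rw [pvAFindStart_spec]
  cases hf : L.findIdx? (fun l => PySem.Chars.startswith l pvNav) with
  | none => simp
  | some i =>
      simp only [Option.map_some, Option.bind_some, Option.bind_eq_bind, Option.pure_def]
      have hlt : i < L.length := by
        have := List.findIdx?_eq_some_iff_findIdx_eq.mp hf
        omega
      obtain ⟨m, hm, heq, hsum⟩ := pvAFindEnd_spec L (i + 1) (by omega)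
      have hcast1 : (0 : Int) + (i : Int) + 1 = ((i + 1 : Nat) : Int) := by push_cast; ring
      rw [hcast1, heq]
      rw [PySem.List.slice_to L (by positivity : (0:Int) ≤ 0 + (i : Int)),
          PySem.List.slice_to L (by positivity : (0:Int) ≤ (m : Int))]
      have h1 : ((0 : Int) + (i : Int)).toNat = i := by omega
      have h2 : ((m : Int)).toNat = m := by omega
      rw [h1, h2, hsum]
      simp

-- ===== VERDICT (by name: the statement is the Claim_ definition above) =====
theorem find_nav_block_spec : Claim_equal_find_nav_block := by
  intro content _
  unfold Spec_find_nav_block find_nav_block find_nav_block_alt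
  rw [pvBLoop_none, pvABody_eq]
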